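-- pv_equiv track=rewrite | github.com/msunbot/vibejam | scripts/prepare_rewrite_pairs.py | split_into_chunks
-- ===== SOURCE A (Python) =====
-- def split_into_chunks(text: str, min_chars: int, max_chars: int):
--     """
--     Split text into roughly paragraph-sized chunks.
--     Very simple heuristic:
--     - split by blank lines
--     - pack paragraphs together until max_chars
--     """
--     paras = [p.strip() for p in text.split("\n\n") if p.strip()]
--     chunks = []
--     cur = ""
--
--     for p in paras:
--         if not cur:
--             cur = p
--         elif len(cur) + 2 + len(p) <= max_chars:
--             cur = cur + "\n\n" + p
--         else:
--             if len(cur) >= min_chars: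
--                 chunks.append(cur)
--             cur = p
--
--     if cur and len(cur) >= min_chars:
--         chunks.append(cur)
--
--     return chunks
-- ===== SOURCE B (Python) =====
-- def split_into_chunks(text: str, min_chars: int, max_chars: int):
--     # Chunk-at-a-time recursion: peel off the maximal prefix of paragraphs that
--     # fits in max_chars (always at least one), join it, keep it if long enough,
--     # and recurse on the rest.
--     paras = [p.strip() for p in text.split("\n\n") if p.strip()]
--
--     def pack(ps):
--         if not ps:
--             return []
--         total = len(ps[0])
--         k = 1
--         for p in ps[1:]:
--             if total + 2 + len(p) > max_chars:
--                 break
--             total += 2 + len(p)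
--             k += 1
--         head = "\n\n".join(ps[:k])
--         return ([head] if len(head) >= min_chars else []) + pack(ps[k:])
--
--     return pack(paras)
-- ===== Notes on version B (the rewrite author's own statement) =====
-- stated objective: alternative
-- what changed: Replaces A's single paragraph-by-paragraph fold with a pack-and-flush string accumulator by chunk-at-a-time recursion: each step peels off the maximal prefix of paragraphs fitting max_chars, joins and filters it, and recurses on the remaining suffix.
import Mathlib
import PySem

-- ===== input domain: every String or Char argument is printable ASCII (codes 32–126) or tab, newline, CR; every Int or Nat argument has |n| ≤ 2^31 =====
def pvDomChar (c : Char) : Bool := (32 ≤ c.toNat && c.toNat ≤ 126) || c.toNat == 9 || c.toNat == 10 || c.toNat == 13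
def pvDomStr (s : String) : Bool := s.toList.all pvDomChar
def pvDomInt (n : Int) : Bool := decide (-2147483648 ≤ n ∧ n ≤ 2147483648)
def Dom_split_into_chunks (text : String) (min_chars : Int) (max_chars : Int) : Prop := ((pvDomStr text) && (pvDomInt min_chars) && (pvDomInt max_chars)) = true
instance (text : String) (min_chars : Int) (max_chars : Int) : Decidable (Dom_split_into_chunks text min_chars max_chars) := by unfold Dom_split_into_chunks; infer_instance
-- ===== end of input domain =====

-- B replaces A's paragraph-by-paragraph pack-and-flush fold with chunk-at-a-time recursion:
-- peel off the maximal fitting prefix of paragraphs, join/filter it, recurse on the suffix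
-- (alternative decomposition, same cost).


-- ===== PORT A =====
-- shared by both Pythons' identical first line: paras = [p.strip() for p in text.split("\n\n") if p.strip()]
def pvSep : List Char := ['\n', '\n']

def pvParas (text : String) : List (List Char) :=
  ((PySem.Chars.splitOn text.toList pvSep).map PySem.Chars.strip).filter (fun p => !p.isEmpty)

-- one iteration of A's loop over state (chunks, cur)
def pvStepA (min_chars max_chars : Int) (s : List (List Char) × List Char) (p : List Char) :
    List (List Char) × List Char :=
  if s.2 = [] then (s.1, p)
  else if (s.2.length : Int) + 2 + (p.length : Int) ≤ max_chars then (s.1, s.2 ++ pvSep ++ p)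
  else if (s.2.length : Int) ≥ min_chars then (s.1 ++ [s.2], p)
  else (s.1, p)

def split_into_chunks (text : String) (min_chars : Int) (max_chars : Int) : List String :=
  let r := (pvParas text).foldl (pvStepA min_chars max_chars) ([], [])
  let chunks := if r.2 ≠ [] ∧ (r.2.length : Int) ≥ min_chars then r.1 ++ [r.2] else r.1
  chunks.map String.ofList

-- ===== PORT B =====
-- Source B's inner for-loop with break: number of EXTRA paragraphs (beyond the first,
-- whose length is `total`) that still fit; Source B's k is 1 + this count.
def pvInner (max_chars : Int) (total : Int) : List (List Char) → Nat
  | [] => 0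
  | p :: t =>
    if total + 2 + (p.length : Int) > max_chars then 0
    else 1 + pvInner max_chars (total + 2 + (p.length : Int)) t

-- Source B's recursive pack(ps)
def pvPack (min_chars max_chars : Int) : List (List Char) → List (List Char)
  | [] => []
  | p :: rest =>
    let k := pvInner max_chars (p.length : Int) rest + 1
    let head := PySem.Chars.join pvSep ((p :: rest).take k)
    (if (head.length : Int) ≥ min_chars then [head] else []) ++
      pvPack min_chars max_chars ((p :: rest).drop k)
  termination_by l => l.length
  decreasing_by simp

def split_into_chunks_alt (text : String) (min_chars : Int) (max_chars : Int) : List String :=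
  (pvPack min_chars max_chars (pvParas text)).map String.ofList

-- ===== PRECONDITION & SPEC =====
def Spec_split_into_chunks (text : String) (min_chars : Int) (max_chars : Int) (out : List String) : Prop := out = split_into_chunks_alt text min_chars max_chars
instance (text : String) (min_chars : Int) (max_chars : Int) (out : List String) : Decidable (Spec_split_into_chunks text min_chars max_chars out) := by unfold Spec_split_into_chunks; infer_instance

-- ===== CLAIM (what is proved, stated in full; the proofs are below) =====
def Claim_equal_split_into_chunks : Prop := ∀ (text : String) (min_chars : Int) (max_chars : Int), Dom_split_into_chunks text min_chars max_chars → Spec_split_into_chunks text min_chars max_chars (split_into_chunks text min_chars max_chars)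

-- ===== LEMMAS AND PROOFS =====

-- intermediate form used by the induction: pack starting from a partially built chunk `cur`
def pvFilt (min_chars : Int) (c : List Char) : List (List Char) :=
  if (c.length : Int) ≥ min_chars then [c] else []

def pvPackFrom (min_chars max_chars : Int) (cur : List Char) (ps : List (List Char)) :
    List (List Char) :=
  let i := pvInner max_chars (cur.length : Int) ps
  pvFilt min_chars ((ps.take i).foldl (fun c q => c ++ pvSep ++ q) cur) ++
    pvPack min_chars max_chars (ps.drop i)

lemma pvPack_nil (min_chars max_chars : Int) : pvPack min_chars max_chars [] = [] := by
  rw [pvPack.eq_def]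

lemma pvFoldl_append (a : List Char) : ∀ (l : List (List Char)) (b : List Char),
    l.foldl (fun c q => c ++ pvSep ++ q) (a ++ b) =
      a ++ l.foldl (fun c q => c ++ pvSep ++ q) b := by
  intro l
  induction l with
  | nil => intro b; rfl
  | cons q t ih =>
    intro b
    simp only [List.foldl_cons]
    have h : a ++ b ++ pvSep ++ q = a ++ (b ++ pvSep ++ q) := by
      simp [List.append_assoc]
    rw [h]
    exact ih (b ++ pvSep ++ q)

lemma pvJoin_foldl : ∀ (l : List (List Char)) (p : List Char),
    PySem.Chars.join pvSep (p :: l) = l.foldl (fun c q => c ++ pvSep ++ q) p := by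
  intro l
  induction l with
  | nil => intro p; simp [PySem.Chars.join_singleton]
  | cons q t ih =>
    intro p
    rw [PySem.Chars.join_cons_cons, ih q, List.foldl_cons]
    have h := pvFoldl_append (p ++ pvSep) t q
    simp only [List.append_assoc] at h ⊢
    exact h.symm

lemma pvPack_cons (min_chars max_chars : Int) (p : List Char) (rest : List (List Char)) :
    pvPack min_chars max_chars (p :: rest) = pvPackFrom min_chars max_chars p rest := by
  rw [pvPack.eq_def]
  simp only [pvPackFrom, pvFilt, List.take_succ_cons, List.drop_succ_cons, pvJoin_foldl]

-- main invariant: A's loop, started from a nonempty current chunk, finalizes to B's pack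
lemma pv_loop (min_chars max_chars : Int) :
    ∀ (ps : List (List Char)) (chunks : List (List Char)) (cur : List Char),
    (∀ q ∈ ps, q ≠ []) → cur ≠ [] →
    (let r := ps.foldl (pvStepA min_chars max_chars) (chunks, cur);
     if r.2 ≠ [] ∧ (r.2.length : Int) ≥ min_chars then r.1 ++ [r.2] else r.1)
    = chunks ++ pvPackFrom min_chars max_chars cur ps := by
  intro ps
  induction ps with
  | nil =>
    intro chunks cur _ hcur
    simp only [List.foldl_nil, pvPackFrom, pvInner, List.take_nil, List.drop_nil,
      pvPack_nil, List.append_nil, pvFilt]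
    split_ifs with h1 h2 h2 <;> simp_all
  | cons p t ih =>
    intro chunks cur hne hcur
    have hp : p ≠ [] := hne p (by simp)
    have hnt : ∀ q ∈ t, q ≠ [] := fun q hq => hne q (by simp [hq])
    simp only [List.foldl_cons]
    by_cases hfit : (cur.length : Int) + 2 + (p.length : Int) ≤ max_chars
    · have hA : pvStepA min_chars max_chars (chunks, cur) p = (chunks, cur ++ pvSep ++ p) := by
        simp [pvStepA, hcur, hfit]
      rw [hA, ih chunks (cur ++ pvSep ++ p) hnt (by simp [pvSep])]
      congr 1
      have hlen : ((cur ++ pvSep ++ p).length : Int) =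
          (cur.length : Int) + 2 + (p.length : Int) := by
        simp [pvSep]; ring
      have hi : pvInner max_chars (cur.length : Int) (p :: t) =
          pvInner max_chars ((cur ++ pvSep ++ p).length : Int) t + 1 := by
        simp only [pvInner]
        rw [if_neg (by omega), ← hlen]
        omega
      simp only [pvPackFrom, hi, List.take_succ_cons, List.drop_succ_cons, List.foldl_cons]
    · have hA : pvStepA min_chars max_chars (chunks, cur) p =
          (chunks ++ pvFilt min_chars cur, p) := by
        simp only [pvStepA, pvFilt]
        split_ifs with c1 c2 c3 <;> simp_all
      rw [hA, ih (chunks ++ pvFilt min_chars cur) p hnt hp]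
      have hi : pvInner max_chars (cur.length : Int) (p :: t) = 0 := by
        simp only [pvInner]
        rw [if_pos (by omega)]
      conv_rhs => rw [pvPackFrom]
      simp only [hi, List.take_zero, List.foldl_nil, List.drop_zero, pvPack_cons,
        List.append_assoc]

lemma pvParas_ne_nil (text : String) : ∀ p ∈ pvParas text, p ≠ [] := by
  intro p hp
  have := (List.mem_filter.mp hp).2
  intro h
  subst h
  simp at this

-- ===== VERDICT (by name: the statement is the Claim_ definition above) =====
theorem split_into_chunks_spec : Claim_equal_split_into_chunks := by
  intro text min_chars max_chars _
  unfold Spec_split_into_chunks split_into_chunks split_into_chunks_alt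
  cases hps : pvParas text with
  | nil => simp [pvPack_nil]
  | cons p t =>
    have hne := pvParas_ne_nil text
    rw [hps] at hne
    have hp : p ≠ [] := hne p (by simp)
    have hnt : ∀ q ∈ t, q ≠ [] := fun q hq => hne q (by simp [hq])
    have h1 : pvStepA min_chars max_chars ([], []) p = ([], p) := by simp [pvStepA]
    have := pv_loop min_chars max_chars t [] p hnt hp
    simp only [List.foldl_cons, h1]
    rw [this, pvPack_cons]
    simp
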